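-- pv_equiv track=rewrite | github.com/uprootiny/backstage-server-lab | src/labops/rna_3d_pipeline.py | label_loop_types
-- ===== SOURCE A (Python) =====
-- from typing import Callable, NamedTuple, Optional, Sequence
--
-- def label_loop_types(bracket: str, pairs: Sequence[tuple[int, int]]) -> list[str]:
--     n = len(bracket)
--     lbl = ["free"] * n
--     pm = dict(list(pairs) + [(j, i) for i, j in pairs])
--     for i, j in pairs:
--         lbl[i] = lbl[j] = "stem"
--     i = 0
--     while i < n:
--         if bracket[i] != ".":
--             i += 1
--             continue
--         j = i
--         while j < n and bracket[j] == ".":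
--             j += 1
--         left = next((k for k in range(i - 1, -1, -1) if bracket[k] == "("), None)
--         right = next((k for k in range(j, n) if bracket[k] == ")"), None)
--         if left is None or right is None:
--             kind = "free"
--         elif pm.get(left) == right:
--             kind = "hairpin"
--         else:
--             partner = pm.get(left)
--             kind = "internal" if partner is not None and partner > right else "bulge"
--         for k in range(i, j):
--             lbl[k] = kind
--         i = j
--     return lbl
-- ===== SOURCE B (Python) =====
-- def label_loop_types(bracket, pairs):
--     n = len(bracket)
--     lbl = ["free"] * n
--     pm = {}
--     for i, j in pairs:
--         pm[i] = j
--     for i, j in pairs: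
--         pm[j] = i
--     for i, j in pairs:
--         lbl[i] = lbl[j] = "stem"
--     # prev_open[k] = nearest '(' strictly left of k, one forward pass
--     prev_open = []
--     last = None
--     for k in range(n):
--         prev_open.append(last)
--         if bracket[k] == "(":
--             last = k
--     # next_close[k] = nearest ')' at or right of k, one backward pass
--     next_close_rev = []
--     nxt = None
--     for k in range(n - 1, -1, -1):
--         if bracket[k] == ")":
--             nxt = k
--         next_close_rev.append(nxt)
--     next_close = next_close_rev[::-1]
--     for k in range(n):
--         if bracket[k] != ".":
--             continue
--         left, right = prev_open[k], next_close[k]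
--         if left is None or right is None:
--             kind = "free"
--         elif pm.get(left) == right:
--             kind = "hairpin"
--         else:
--             partner = pm.get(left)
--             kind = "internal" if partner is not None and partner > right else "bulge"
--         lbl[k] = kind
--     return lbl
-- ===== Notes on version B (the rewrite author's own statement) =====
-- stated objective: alternative
-- what changed: A rescans left for the nearest '(' and right for the nearest ')' for every run of dots; B instead precomputes nearest-left-'(' and nearest-right-')' arrays in one forward and one backward pass and labels each position independently with O(1) lookups (removes A's worst-case quadratic rescans, though not measurably faster on the generated inputs).
import Mathlib
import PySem

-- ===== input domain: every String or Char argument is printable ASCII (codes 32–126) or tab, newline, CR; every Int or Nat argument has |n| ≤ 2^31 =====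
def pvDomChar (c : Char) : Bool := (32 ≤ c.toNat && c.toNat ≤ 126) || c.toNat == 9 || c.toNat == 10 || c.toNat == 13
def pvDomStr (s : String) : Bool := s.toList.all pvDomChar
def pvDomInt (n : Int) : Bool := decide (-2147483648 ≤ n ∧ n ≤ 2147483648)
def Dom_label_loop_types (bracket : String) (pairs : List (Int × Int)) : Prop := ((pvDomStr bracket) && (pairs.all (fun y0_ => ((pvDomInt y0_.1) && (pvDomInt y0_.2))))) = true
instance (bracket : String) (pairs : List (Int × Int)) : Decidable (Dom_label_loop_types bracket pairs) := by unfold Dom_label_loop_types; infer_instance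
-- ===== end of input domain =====

-- B replaces A's per-dot-run backward/forward scans for the nearest '(' / ')' by two
-- precomputed nearest-bracket arrays (one forward pass, one backward pass) and a single
-- per-position pass. Same return value on Pre_ (pair indices in range).

-- ===== PORT A =====
-- shared by both ports: 'lbl = ["free"]*n; for i, j in pairs: lbl[i] = lbl[j] = "stem"'
-- (this loop is textually identical in A and in B)
def pvStem (n : Nat) (pairs : List (Int × Int)) : List String :=
  pairs.foldl (fun lbl p => PySem.List.pySetD (PySem.List.pySetD lbl p.1 "stem") p.2 "stem")
    (List.replicate n "free")

def pvKind (pm : PySem.Dict Int Int) (left right : Option Int) : String :=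
  match left, right with
  | some l, some r =>
      if pm.get? l == some r then "hairpin"
      else match pm.get? l with
        | some partner => if partner > r then "internal" else "bulge"
        | none => "bulge"
  | _, _ => "free"

def pvFindOpenLeft (cs : List Char) (i : Int) : Option Int :=
  (PySem.List.pyRange (i - 1) (-1) (-1)).find? (fun k => PySem.List.pyGetD cs k ' ' == '(')

def pvFindCloseRight (cs : List Char) (j : Int) : Option Int :=
  (PySem.List.pyRange j (PySem.List.len cs) 1).find? (fun k => PySem.List.pyGetD cs k ' ' == ')')

def pvScanDots (cs : List Char) (j : Nat) : Nat :=
  if j < cs.length ∧ PySem.List.pyGetD cs (j : Int) ' ' = '.' then pvScanDots cs (j + 1) else j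
termination_by cs.length - j
decreasing_by omega

theorem pvScanDots_ge (cs : List Char) (j : Nat) : j ≤ pvScanDots cs j := by
  fun_induction pvScanDots cs j with
  | case1 j h ih => omega
  | case2 j h => omega

def pvLoopA (cs : List Char) (pm : PySem.Dict Int Int) (lbl : List String) (i : Nat) : List String :=
  if i < cs.length then
    if PySem.List.pyGetD cs (i : Int) ' ' ≠ '.' then pvLoopA cs pm lbl (i + 1)
    else
      let j := pvScanDots cs i
      let left := pvFindOpenLeft cs (i : Int)
      let right := pvFindCloseRight cs (j : Int)
      let kind := pvKind pm left right
      let lbl' := (PySem.List.pyRange (i : Int) (j : Int) 1).foldl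
        (fun l k => PySem.List.pySetD l k kind) lbl
      pvLoopA cs pm lbl' j
  else lbl
termination_by cs.length - i
decreasing_by
  · omega
  · have h1 : i + 1 ≤ pvScanDots cs (i + 1) := pvScanDots_ge cs (i + 1)
    have h2 : pvScanDots cs i = pvScanDots cs (i + 1) := by
      rw [pvScanDots]; simp_all
    omega

def label_loop_types (bracket : String) (pairs : List (Int × Int)) : List String :=
  pvLoopA bracket.toList (PySem.Dict.ofList (pairs ++ pairs.map (fun p => (p.2, p.1))))
    (pvStem bracket.toList.length pairs) 0

-- ===== PORT B =====
-- pm = {}; for i, j in pairs: pm[i] = j; for i, j in pairs: pm[j] = i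
def pvPmB (pairs : List (Int × Int)) : PySem.Dict Int Int :=
  pairs.foldl (fun d p => d.insert p.2 p.1)
    (pairs.foldl (fun d p => d.insert p.1 p.2) PySem.Dict.empty)

def pvPrevPass (cs : List Char) : Option Int × List (Option Int) :=
  (PySem.List.pyRange 0 (PySem.List.len cs) 1).foldl
    (fun st k =>
      (if PySem.List.pyGetD cs k ' ' = '(' then some k else st.1, st.2 ++ [st.1]))
    (none, [])

def pvNextPass (cs : List Char) : Option Int × List (Option Int) :=
  (PySem.List.pyRange (PySem.List.len cs - 1) (-1) (-1)).foldl
    (fun st k =>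
      let nxt := if PySem.List.pyGetD cs k ' ' = ')' then some k else st.1
      (nxt, st.2 ++ [nxt]))
    (none, [])

def pvLoopB (cs : List Char) (pm : PySem.Dict Int Int) (po nc : List (Option Int))
    (lbl : List String) : List String :=
  (PySem.List.pyRange 0 (PySem.List.len cs) 1).foldl
    (fun l k =>
      if PySem.List.pyGetD cs k ' ' ≠ '.' then l
      else
        let left := PySem.List.pyGetD po k none
        let right := PySem.List.pyGetD nc k none
        PySem.List.pySetD l k (pvKind pm left right))
    lbl

def label_loop_types_alt (bracket : String) (pairs : List (Int × Int)) : List String :=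
  pvLoopB bracket.toList (pvPmB pairs) (pvPrevPass bracket.toList).2
    (pvNextPass bracket.toList).2.reverse (pvStem bracket.toList.length pairs)

-- ===== PRECONDITION & SPEC =====
-- Pre_ excludes exactly the inputs on which both Pythons raise IndexError:
-- a pair index outside [-n, n) makes 'lbl[i] = lbl[j] = "stem"' raise in A and in B.
def Pre_label_loop_types (bracket : String) (pairs : List (Int × Int)) : Prop :=
  ∀ p ∈ pairs, PySem.Raise.InRange bracket.toList.length p.1 ∧
    PySem.Raise.InRange bracket.toList.length p.2
instance (bracket : String) (pairs : List (Int × Int)) : Decidable (Pre_label_loop_types bracket pairs) := by unfold Pre_label_loop_types; infer_instance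

def pvWitness_label_loop_types : String × (List (Int × Int)) := ("((..).)", [(0, 6), (1, 4)])

def Spec_label_loop_types (bracket : String) (pairs : List (Int × Int)) (out : List String) : Prop := out = label_loop_types_alt bracket pairs
instance (bracket : String) (pairs : List (Int × Int)) (out : List String) : Decidable (Spec_label_loop_types bracket pairs out) := by unfold Spec_label_loop_types; infer_instance

-- ===== CLAIM (what is proved, stated in full; the proofs are below) =====
def Claim_equal_label_loop_types : Prop := ∀ (bracket : String) (pairs : List (Int × Int)), Dom_label_loop_types bracket pairs → Pre_label_loop_types bracket pairs → Spec_label_loop_types bracket pairs (label_loop_types bracket pairs)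

-- ===== LEMMAS AND PROOFS =====

theorem pv_pm_eq (pairs : List (Int × Int)) :
    PySem.Dict.ofList (pairs ++ pairs.map (fun p => (p.2, p.1))) = pvPmB pairs := by
  simp [PySem.Dict.ofList, PySem.Dict.update, pvPmB, List.foldl_append, List.foldl_map]

theorem pvFindOpenLeft_succ (cs : List Char) (k : Nat) :
    pvFindOpenLeft cs ((k + 1 : Nat) : Int) =
      if cs.getD k ' ' = '(' then some (k : Int) else pvFindOpenLeft cs (k : Int) := by
  unfold pvFindOpenLeft
  have h : ((k + 1 : Nat) : Int) - 1 = (k : Nat) := by push_cast; ring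
  rw [h, PySem.List.pyRange_neg_one_cons (by omega)]
  simp only [List.find?_cons, PySem.List.pyGetD_natCast]
  split_ifs with h
  · simp [List.getD] at h ⊢; simp [h]
  · rw [show (cs.getD k ' ' == '(') = false from beq_eq_false_iff_ne.mpr h]

theorem pvFindCloseRight_end (cs : List Char) : pvFindCloseRight cs (cs.length : Int) = none := by
  unfold pvFindCloseRight
  rw [PySem.List.pyRange_one_eq_nil (by simp)]
  rfl

theorem pvFindCloseRight_step (cs : List Char) (k : Nat) (hk : k < cs.length) :
    pvFindCloseRight cs (k : Int) =
      if cs.getD k ' ' = ')' then some (k : Int) else pvFindCloseRight cs ((k + 1 : Nat) : Int) := by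
  unfold pvFindCloseRight
  rw [PySem.List.pyRange_one_cons (by simp; exact_mod_cast hk)]
  simp only [List.find?_cons, PySem.List.pyGetD_natCast]
  have hx : cs[k]?.getD ' ' = cs[k] := by simp [List.getElem?_eq_getElem hk]
  split_ifs with h <;>
    simp only [List.getD, List.getElem?_eq_getElem hk, Option.getD_some] at h
  · simp [hx, h]
  · rw [show (cs.getD k ' ' == ')') = false from beq_eq_false_iff_ne.mpr (by simp only [List.getD]; exact hx ▸ h)]
    push_cast
    rfl

theorem pvFindOpenLeft_run (cs : List Char) (i m : Nat) (him : i ≤ m)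
    (hdots : ∀ t, i ≤ t → t < m → cs.getD t ' ' = '.') :
    pvFindOpenLeft cs (m : Int) = pvFindOpenLeft cs (i : Int) := by
  induction m, him using Nat.le_induction with
  | base => rfl
  | succ m hm ih =>
    rw [pvFindOpenLeft_succ, if_neg (by have h := hdots m hm (by omega); simp only [List.getD] at h; simp [h]), ih]
    intro t h1 h2; exact hdots t h1 (by omega)

theorem pvFindCloseRight_run (cs : List Char) (m j : Nat) (hmj : m ≤ j) (hj : j ≤ cs.length)
    (hdots : ∀ t, m ≤ t → t < j → cs.getD t ' ' = '.') :
    pvFindCloseRight cs (m : Int) = pvFindCloseRight cs (j : Int) := by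
  obtain ⟨d, hd⟩ : ∃ d, j = m + d := ⟨j - m, by omega⟩
  subst hd
  clear hmj
  induction d generalizing m with
  | zero => rfl
  | succ d ih =>
    rw [pvFindCloseRight_step cs m (by omega), if_neg (by have h := hdots m (le_refl _) (by omega); simp only [List.getD] at h; simp [h])]
    have := ih (m + 1) (by omega) (fun t h1 h2 => hdots t (by omega) (by omega))
    rw [this]; congr 1; omega

def pvPrevPassF (cs : List Char) :=
  (fun (st : Option Int × List (Option Int)) (k : Int) =>
      (if PySem.List.pyGetD cs k ' ' = '(' then some k else st.1, st.2 ++ [st.1]))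

theorem pvPrevPass_gen (cs : List Char) (m : Nat) (hm : m ≤ cs.length) :
    (PySem.List.pyRange 0 (m : Int) 1).foldl (pvPrevPassF cs) (none, []) =
      (pvFindOpenLeft cs (m : Int), (List.range m).map (fun k => pvFindOpenLeft cs (k : Int))) := by
  induction m with
  | zero =>
    rw [PySem.List.pyRange_one_eq_nil (by omega)]
    simp [pvFindOpenLeft]
  | succ m ih =>
    have hcast : ((m + 1 : Nat) : Int) = (m : Int) + 1 := by push_cast; ring
    rw [hcast, PySem.List.pyRange_one_succ_right (by omega), List.foldl_append,
      ih (by omega)]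
    simp only [List.foldl, pvPrevPassF, List.range_succ, PySem.List.pyGetD_natCast]
    rw [← hcast, pvFindOpenLeft_succ]
    split_ifs <;> simp

def pvNextPassF (cs : List Char) :=
  (fun (st : Option Int × List (Option Int)) (k : Int) =>
      let nxt := if PySem.List.pyGetD cs k ' ' = ')' then some k else st.1
      (nxt, st.2 ++ [nxt]))

theorem pvNextPass_gen (cs : List Char) (m : Nat) (hm : m < cs.length)
    (st : List (Option Int)) :
    (PySem.List.pyRange (m : Int) (-1) (-1)).foldl (pvNextPassF cs)
        (pvFindCloseRight cs ((m + 1 : Nat) : Int), st) =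
      ((pvFindCloseRight cs ((0 : Nat) : Int)),
        st ++ (List.range (m + 1)).reverse.map (fun k => pvFindCloseRight cs (k : Int))) := by
  induction m generalizing st with
  | zero =>
    rw [PySem.List.pyRange_neg_one_cons (by omega), PySem.List.pyRange_neg_one_eq_nil (by omega)]
    have h0 := pvFindCloseRight_step cs 0 hm
    simp only [Nat.cast_zero, Nat.cast_one, Nat.zero_add] at h0 ⊢
    simp only [List.foldl, pvNextPassF, PySem.List.pyGetD_zero]
    rw [← h0]
    simp
  | succ m ih =>
    rw [PySem.List.pyRange_neg_one_cons (by omega)]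
    simp only [List.foldl, pvNextPassF, PySem.List.pyGetD_natCast]
    have hstep := pvFindCloseRight_step cs (m + 1) hm
    have hc : ((m + 1 : Nat) : Int) - 1 = (m : Int) := by push_cast; ring
    rw [hc, ← hstep, ih (by omega)]
    simp only [Prod.mk.injEq]
    refine ⟨trivial, ?_⟩
    rw [List.append_assoc]
    congr 1
    have hrev : (List.range (m + 1 + 1)).reverse = (m + 1) :: (List.range (m + 1)).reverse := by
      rw [List.range_succ]; simp
    rw [hrev]
    simp

theorem pvPrevPass_snd (cs : List Char) :
    (pvPrevPass cs).2 = (List.range cs.length).map (fun k : Nat => pvFindOpenLeft cs (k : Int)) := by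
  have h := pvPrevPass_gen cs cs.length (le_refl _)
  unfold pvPrevPass
  rw [show (PySem.List.len cs) = ((cs.length : Nat) : Int) from PySem.List.len_eq cs]
  rw [show (fun (st : Option Int × List (Option Int)) (k : Int) =>
      (if PySem.List.pyGetD cs k ' ' = '(' then some k else st.1, st.2 ++ [st.1])) = pvPrevPassF cs from rfl]
  rw [h]
  simp [← List.map_eq_flatMap, List.map_map, Function.comp]

theorem pvNextPass_snd (cs : List Char) :
    (pvNextPass cs).2.reverse = (List.range cs.length).map (fun k : Nat => pvFindCloseRight cs (k : Int)) := by
  unfold pvNextPass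
  rw [show (PySem.List.len cs) = ((cs.length : Nat) : Int) from PySem.List.len_eq cs]
  rw [show (fun (st : Option Int × List (Option Int)) (k : Int) =>
      let nxt := if PySem.List.pyGetD cs k ' ' = ')' then some k else st.1
      (nxt, st.2 ++ [nxt])) = pvNextPassF cs from rfl]
  rcases Nat.eq_zero_or_pos cs.length with h0 | hpos
  · rw [h0]
    rw [PySem.List.pyRange_neg_one_eq_nil (by omega)]
    simp
  · obtain ⟨m, hm⟩ : ∃ m, cs.length = m + 1 := ⟨cs.length - 1, by omega⟩
    have hinit : (none : Option Int) = pvFindCloseRight cs ((m + 1 : Nat) : Int) := by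
      rw [← hm]
      exact (pvFindCloseRight_end cs).symm
    rw [hm]
    rw [show ((m + 1 : Nat) : Int) - 1 = ((m : Nat) : Int) by push_cast; ring]
    rw [hinit, pvNextPass_gen cs m (by omega) []]
    simp [← List.map_eq_flatMap, List.map_reverse, List.map_map, Function.comp]

theorem pvScanDots_spec (cs : List Char) (i : Nat) (hi : i ≤ cs.length) :
    pvScanDots cs i ≤ cs.length ∧
    (∀ t, i ≤ t → t < pvScanDots cs i → cs.getD t ' ' = '.') ∧
    (pvScanDots cs i < cs.length → cs.getD (pvScanDots cs i) ' ' ≠ '.') := by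
  fun_induction pvScanDots cs i with
  | case1 j h ih =>
    obtain ⟨h1, h2⟩ := h
    obtain ⟨ih1, ih2, ih3⟩ := ih (by omega)
    refine ⟨ih1, ?_, ih3⟩
    intro t ht1 ht2
    rcases Nat.eq_or_lt_of_le ht1 with he | hl
    · subst he
      rw [PySem.List.pyGetD_natCast] at h2
      exact h2
    · exact ih2 t (by omega) ht2
  | case2 j h =>
    rw [Decidable.not_and_iff_not_or_not] at h
    refine ⟨hi, fun t h1 h2 => absurd h2 (by omega), ?_⟩
    intro hlt
    rcases h with h | h
    · omega
    · rw [PySem.List.pyGetD_natCast] at h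
      exact h

-- inner assignment loop: for k in range(i, j): lbl[k] = kind

theorem pvSetRange_spec (i d : Nat) (kind : String) (lbl : List String) :
    ((PySem.List.pyRange (i : Int) ((i + d : Nat) : Int) 1).foldl
        (fun l k => PySem.List.pySetD l k kind) lbl).length = lbl.length ∧
    ∀ m, m < lbl.length →
      ((PySem.List.pyRange (i : Int) ((i + d : Nat) : Int) 1).foldl
          (fun l k => PySem.List.pySetD l k kind) lbl).getD m "" =
        if i ≤ m ∧ m < i + d then kind else lbl.getD m "" := by
  induction d generalizing lbl with
  | zero =>
    rw [Nat.add_zero, PySem.List.pyRange_one_eq_nil (by omega)]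
    exact ⟨rfl, fun m _ => by rw [if_neg (by omega)]; rfl⟩
  | succ d ih =>
    rw [show ((i + (d+1) : Nat) : Int) = ((i + d : Nat) : Int) + 1 by push_cast; ring,
      PySem.List.pyRange_one_succ_right (by omega), List.foldl_append]
    obtain ⟨ih1, ih2⟩ := ih lbl
    simp only [List.foldl, PySem.List.pySetD_natCast]
    constructor
    · rw [List.length_set]; exact ih1
    · intro m hm
      rw [List.getD_eq_getElem?_getD, List.getElem?_set]
      by_cases hm2 : i + d = m
      · subst hm2
        rw [if_pos rfl, if_pos (by omega), if_pos (by omega)]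
        rfl
      · rw [if_neg hm2, ← List.getD_eq_getElem?_getD, ih2 m hm]
        by_cases hc : i ≤ m ∧ m < i + d
        · rw [if_pos hc, if_pos (by omega)]
        · rw [if_neg hc, if_neg (by omega)]

theorem pvStem_length (n : Nat) (pairs : List (Int × Int)) : (pvStem n pairs).length = n := by
  unfold pvStem
  suffices h : ∀ (l : List String), (pairs.foldl
      (fun lbl p => PySem.List.pySetD (PySem.List.pySetD lbl p.1 "stem") p.2 "stem") l).length = l.length by
    rw [h]; exact List.length_replicate
  intro l
  induction pairs generalizing l with
  | nil => rfl
  | cons p ps ih => rw [List.foldl_cons, ih, PySem.List.length_pySetD, PySem.List.length_pySetD]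

theorem pv_po_at (cs : List Char) (t : Nat) (ht : t < cs.length) :
    PySem.List.pyGetD (pvPrevPass cs).2 (t : Int) none = pvFindOpenLeft cs (t : Int) := by
  rw [PySem.List.pyGetD_natCast, pvPrevPass_snd]
  rw [PySem.List.getD_map_range _ _ _ _ ht]

theorem pv_nc_at (cs : List Char) (t : Nat) (ht : t < cs.length) :
    PySem.List.pyGetD (pvNextPass cs).2.reverse (t : Int) none = pvFindCloseRight cs (t : Int) := by
  rw [PySem.List.pyGetD_natCast, pvNextPass_snd]
  rw [PySem.List.getD_map_range _ _ _ _ ht]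

theorem pvLoopA_spec (cs : List Char) (pm : PySem.Dict Int Int) (i : Nat) (lbl : List String)
    (hlen : lbl.length = cs.length) (hi : i ≤ cs.length) :
    (pvLoopA cs pm lbl i).length = cs.length ∧
    ∀ m, m < cs.length →
      (pvLoopA cs pm lbl i).getD m "" =
        if m < i then lbl.getD m ""
        else if cs.getD m ' ' = '.' then
          pvKind pm (pvFindOpenLeft cs (m : Int)) (pvFindCloseRight cs (m : Int))
        else lbl.getD m "" := by
  fun_induction pvLoopA cs pm lbl i with
  | case1 lbl i hlt hdot ih =>
    -- bracket[i] != '.', move on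
    obtain ⟨ih1, ih2⟩ := ih hlen (by omega)
    rw [PySem.List.pyGetD_natCast] at hdot
    refine ⟨ih1, ?_⟩
    intro m hm
    rw [ih2 m hm]
    by_cases h1 : m < i
    · rw [if_pos (by omega), if_pos h1]
    · rw [if_neg h1]
      by_cases h2 : m < i + 1
      · have : m = i := by omega
        subst this
        rw [if_pos (by omega), if_neg hdot]
      · rw [if_neg h2]
  | case2 lbl i hlt hdot j left right kind lbl' ih =>
    rw [Decidable.not_not] at hdot
    rw [PySem.List.pyGetD_natCast] at hdot
    obtain ⟨hs1, hs2, hs3⟩ := pvScanDots_spec cs i (by omega)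
    have hij : i ≤ j := pvScanDots_ge cs i
    obtain ⟨hr1, hr2⟩ := pvSetRange_spec i (j - i) kind lbl
    have hrange : ((i + (j - i) : Nat) : Int) = ((j : Nat) : Int) := by
      push_cast; omega
    rw [hrange] at hr1 hr2
    have hlen' : lbl'.length = cs.length := by rw [show lbl' = lbl' from rfl]; rw [show lbl'.length = lbl.length from hr1, hlen]
    obtain ⟨ih1, ih2⟩ := ih hlen' hs1
    refine ⟨ih1, ?_⟩
    intro m hm
    rw [ih2 m hm]
    by_cases h1 : m < i
    · rw [if_pos (by omega), if_pos h1, hr2 m (by omega), if_neg (by omega)]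
    · rw [if_neg h1]
      by_cases h2 : m < j
      · -- inside the run
        have hdm : cs.getD m ' ' = '.' := by
          rcases Nat.eq_or_lt_of_le (show i ≤ m by omega) with he | hl
          · subst he; exact hdot
          · exact hs2 m (by omega) h2
        rw [if_pos h2, if_pos hdm, hr2 m (by omega), if_pos (by omega)]
        -- kind = pvKind pm (FOL m) (FCR m)
        have hfol : pvFindOpenLeft cs (m : Int) = pvFindOpenLeft cs (i : Int) :=
          pvFindOpenLeft_run cs i m (by omega) (fun t ht1 ht2 => hs2 t ht1 (by omega))
        have hfcr : pvFindCloseRight cs (m : Int) = pvFindCloseRight cs (j : Int) :=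
          pvFindCloseRight_run cs m j (by omega) hs1 (fun t ht1 ht2 => hs2 t (by omega) ht2)
        rw [hfol, hfcr]
      · rw [if_neg h2]
        by_cases h3 : cs.getD m ' ' = '.'
        · rw [if_pos h3, if_pos h3]
        · rw [if_neg h3, if_neg h3, hr2 m (by omega), if_neg (by omega)]
  | case3 lbl i hlt =>
    refine ⟨hlen, ?_⟩
    intro m hm
    rw [if_pos (by omega)]

theorem pvLoopB_gen (cs : List Char) (pm : PySem.Dict Int Int) (m : Nat) (hm : m ≤ cs.length)
    (lbl : List String) (hlen : lbl.length = cs.length) :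
    ((PySem.List.pyRange 0 (m : Int) 1).foldl
      (fun l k =>
        if PySem.List.pyGetD cs k ' ' ≠ '.' then l
        else PySem.List.pySetD l k (pvKind pm (PySem.List.pyGetD (pvPrevPass cs).2 k none)
          (PySem.List.pyGetD (pvNextPass cs).2.reverse k none)))
      lbl).length = cs.length ∧
    ∀ t, t < cs.length →
      ((PySem.List.pyRange 0 (m : Int) 1).foldl
        (fun l k =>
          if PySem.List.pyGetD cs k ' ' ≠ '.' then l
          else PySem.List.pySetD l k (pvKind pm (PySem.List.pyGetD (pvPrevPass cs).2 k none)
            (PySem.List.pyGetD (pvNextPass cs).2.reverse k none)))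
        lbl).getD t "" =
        if t < m ∧ cs.getD t ' ' = '.' then
          pvKind pm (pvFindOpenLeft cs (t : Int)) (pvFindCloseRight cs (t : Int))
        else lbl.getD t "" := by
  induction m with
  | zero =>
    rw [PySem.List.pyRange_one_eq_nil (by omega)]
    exact ⟨hlen, fun t ht => by rw [if_neg (by omega)]; rfl⟩
  | succ m ih =>
    rw [show ((m + 1 : Nat) : Int) = (m : Int) + 1 by push_cast; ring,
      PySem.List.pyRange_one_succ_right (by omega), List.foldl_append]
    obtain ⟨ih1, ih2⟩ := ih (by omega)
    simp only [List.foldl]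
    by_cases hdot : cs.getD m ' ' = '.'
    · rw [if_neg (by rw [PySem.List.pyGetD_natCast]; simp only [ne_eq, Decidable.not_not]; exact hdot)]
      simp only [pv_po_at cs m (by omega), pv_nc_at cs m (by omega), PySem.List.pySetD_natCast]
      constructor
      · rw [List.length_set]; exact ih1
      · intro t ht
        rw [List.getD_eq_getElem?_getD, List.getElem?_set]
        by_cases hteq : m = t
        · subst hteq
          rw [if_pos rfl, if_pos (by omega), if_pos ⟨by omega, hdot⟩]
          rfl
        · rw [if_neg hteq, ← List.getD_eq_getElem?_getD, ih2 t ht]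
          by_cases hc : t < m ∧ cs.getD t ' ' = '.'
          · rw [if_pos hc, if_pos ⟨by omega, hc.2⟩]
          · rw [if_neg hc, if_neg (by
              intro hc2
              have : t ≠ m := fun he => by subst he; exact hteq rfl
              exact hc ⟨by omega, hc2.2⟩)]
    · rw [if_pos (by rw [PySem.List.pyGetD_natCast]; simp only [ne_eq]; exact hdot)]
      refine ⟨ih1, ?_⟩
      intro t ht
      rw [ih2 t ht]
      by_cases hc : t < m ∧ cs.getD t ' ' = '.'
      · rw [if_pos hc, if_pos ⟨by omega, hc.2⟩]
      · rw [if_neg hc, if_neg (by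
          intro hc2
          have : t ≠ m := by
            intro he; subst he; exact hdot hc2.2
          exact hc ⟨by omega, hc2.2⟩)]

theorem pvLoopB_spec (cs : List Char) (pm : PySem.Dict Int Int) (lbl : List String)
    (hlen : lbl.length = cs.length) :
    (pvLoopB cs pm (pvPrevPass cs).2 (pvNextPass cs).2.reverse lbl).length = cs.length ∧
    ∀ m, m < cs.length →
      (pvLoopB cs pm (pvPrevPass cs).2 (pvNextPass cs).2.reverse lbl).getD m "" =
        if cs.getD m ' ' = '.' then
          pvKind pm (pvFindOpenLeft cs (m : Int)) (pvFindCloseRight cs (m : Int))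
        else lbl.getD m "" := by
  unfold pvLoopB
  rw [show (PySem.List.len cs) = ((cs.length : Nat) : Int) from PySem.List.len_eq cs]
  rw [show (fun (l : List String) (k : Int) =>
      if PySem.List.pyGetD cs k ' ' ≠ '.' then l
      else
        let left := PySem.List.pyGetD (pvPrevPass cs).2 k none
        let right := PySem.List.pyGetD (pvNextPass cs).2.reverse k none
        PySem.List.pySetD l k (pvKind pm left right)) =
    (fun (l : List String) (k : Int) =>
      if PySem.List.pyGetD cs k ' ' ≠ '.' then l
      else PySem.List.pySetD l k (pvKind pm (PySem.List.pyGetD (pvPrevPass cs).2 k none)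
        (PySem.List.pyGetD (pvNextPass cs).2.reverse k none))) from rfl]
  obtain ⟨h1, h2⟩ := pvLoopB_gen cs pm cs.length (le_refl _) lbl hlen
  refine ⟨h1, ?_⟩
  intro m hm
  rw [h2 m hm]
  by_cases hdot : cs.getD m ' ' = '.'
  · rw [if_pos ⟨hm, hdot⟩, if_pos hdot]
  · rw [if_neg (fun hc => hdot hc.2), if_neg hdot]

-- ===== VERDICT (by name: the statement is the Claim_ definition above) =====
theorem label_loop_types_spec : Claim_equal_label_loop_types := by
  intro bracket pairs _ _
  unfold Spec_label_loop_types label_loop_types label_loop_types_alt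
  rw [pv_pm_eq]
  have hlen : (pvStem bracket.toList.length pairs).length = bracket.toList.length :=
    pvStem_length _ pairs
  obtain ⟨hA, hAe⟩ := pvLoopA_spec bracket.toList (pvPmB pairs) 0 _ hlen (Nat.zero_le _)
  obtain ⟨hB, hBe⟩ := pvLoopB_spec bracket.toList (pvPmB pairs) _ hlen
  apply List.ext_getElem (by omega)
  intro m hm1 hm2
  have h1 := hAe m (by omega)
  have h2 := hBe m (by omega)
  simp only [Nat.not_lt_zero, if_false] at h1
  rw [← List.getD_eq_getElem _ "" (by omega), ← List.getD_eq_getElem _ "" (by omega), h1, h2]
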